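-- pv_equiv track=rewrite | github.com/jschnable/PANICLE | scripts/run_GWAS.py | normalize_outputs
-- ===== SOURCE A (Python) =====
-- OUTPUT_CHOICES = (
--     'all_marker_pvalues',
--     'significant_marker_pvalues',
--     'manhattan',
--     'qq',
-- )
--
-- def normalize_outputs(outputs):
--     """Normalize output selections with comma splitting and deduplication."""
--     if not outputs:
--         return list(OUTPUT_CHOICES)
--
--     normalized = []
--     seen = set()
--     for item in outputs:
--         for part in str(item).split(','):
--             part = part.strip().lower()
--             if not part:
--                 continue
--             if part not in OUTPUT_CHOICES:
--                 raise ValueError(f"Invalid output choice: {part}")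
--             if part not in seen:
--                 normalized.append(part)
--                 seen.add(part)
--
--     return normalized if normalized else list(OUTPUT_CHOICES)
-- ===== SOURCE B (Python) =====
-- OUTPUT_CHOICES = (
--     'all_marker_pvalues',
--     'significant_marker_pvalues',
--     'manhattan',
--     'qq',
-- )
--
-- def normalize_outputs(outputs):
--     """Normalize output selections: validate the token stream, then order the
--     canonical choices by the position of their first occurrence in it."""
--     if not outputs:
--         return list(OUTPUT_CHOICES)
--     tokens = [p
--               for item in outputs
--               for p in (q.strip().lower() for q in str(item).split(','))
--               if p]
--     for t in tokens:
--         if t not in OUTPUT_CHOICES: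
--             raise ValueError(f"Invalid output choice: {t}")
--     chosen = [c for c in OUTPUT_CHOICES if c in tokens]
--     chosen.sort(key=tokens.index)
--     return chosen if chosen else list(OUTPUT_CHOICES)
-- ===== Notes on version B (the rewrite author's own statement) =====
-- stated objective: alternative
-- what changed: Instead of A's token-driven loop with a seen-set, B validates the flattened token stream and then iterates over the fixed OUTPUT_CHOICES tuple, keeping the choices present and sorting them by first-occurrence index in the tokens; no seen-set or dedup pass exists.
import Mathlib
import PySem

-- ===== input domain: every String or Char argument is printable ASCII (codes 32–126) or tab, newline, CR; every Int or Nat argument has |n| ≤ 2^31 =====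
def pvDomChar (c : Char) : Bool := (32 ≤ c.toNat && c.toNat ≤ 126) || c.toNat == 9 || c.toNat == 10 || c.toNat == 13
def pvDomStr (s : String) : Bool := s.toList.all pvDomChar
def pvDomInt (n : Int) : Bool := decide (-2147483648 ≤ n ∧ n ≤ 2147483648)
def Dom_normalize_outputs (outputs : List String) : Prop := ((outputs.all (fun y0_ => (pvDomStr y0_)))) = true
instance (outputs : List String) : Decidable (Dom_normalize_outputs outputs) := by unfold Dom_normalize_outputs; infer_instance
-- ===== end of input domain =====

-- B replaces A's token-driven seen-set loop by iterating over the fixed choice tuple and sorting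
-- the present choices by first-occurrence index in the token stream; alternative, not faster.

def pvOutputChoices : List String :=
  ["all_marker_pvalues", "significant_marker_pvalues", "manhattan", "qq"]

-- ===== PORT A =====
-- body of A's inner 'for part in str(item).split(",")' loop
def pvAStepPart (st : List String × PySem.Set String) (part0 : String) :
    List String × PySem.Set String :=
  let part := PySem.Str.lower (PySem.Str.strip part0)
  if part = "" then st
  else if ¬ (part ∈ pvOutputChoices) then st  -- Python raises ValueError here; excluded by Pre_
  else if PySem.Set.contains st.2 part then st
  else (st.1 ++ [part], PySem.Set.add st.2 part)

-- body of A's outer 'for item in outputs' loop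
def pvAStepItem (st : List String × PySem.Set String) (item : String) :
    List String × PySem.Set String :=
  ((PySem.Str.split? item ",").getD []).foldl pvAStepPart st

def normalize_outputs (outputs : List String) : List String :=
  if outputs = [] then pvOutputChoices else
  let st := outputs.foldl pvAStepItem ([], PySem.Set.empty)
  if st.1 = [] then pvOutputChoices else st.1

-- ===== PORT B =====
def normalize_outputs_alt (outputs : List String) : List String :=
  if outputs = [] then pvOutputChoices else
  let tokens := outputs.flatMap (fun item =>
    (((PySem.Str.split? item ",").getD []).map (fun q => PySem.Str.lower (PySem.Str.strip q))).filter
      (fun p => p ≠ ""))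
  -- B's validation loop only raises ValueError (excluded by Pre_) and computes nothing
  let chosen := pvOutputChoices.filter (fun c => decide (c ∈ tokens))
  let chosen := PySem.List.sorted chosen (fun c => (PySem.List.index? tokens c).getD 0)
  if chosen = [] then pvOutputChoices else chosen

-- ===== PRECONDITION & SPEC =====
-- Pre_ excludes exactly the inputs containing an invalid part, on which A (and B) raise ValueError.
def Pre_normalize_outputs (outputs : List String) : Prop :=
  ∀ item ∈ outputs, ∀ q ∈ (PySem.Str.split? item ",").getD [],
    PySem.Str.lower (PySem.Str.strip q) = "" ∨ PySem.Str.lower (PySem.Str.strip q) ∈ pvOutputChoices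
instance (outputs : List String) : Decidable (Pre_normalize_outputs outputs) := by
  unfold Pre_normalize_outputs; infer_instance

def pvWitness_normalize_outputs : List String := ["Manhattan, qq", "", " QQ ,,manhattan"]

def Spec_normalize_outputs (outputs : List String) (out : List String) : Prop :=
  out = normalize_outputs_alt outputs
instance (outputs : List String) (out : List String) : Decidable (Spec_normalize_outputs outputs out) := by
  unfold Spec_normalize_outputs; infer_instance

-- ===== CLAIM (what is proved, stated in full; the proofs are below) =====
def Claim_equal_normalize_outputs : Prop := ∀ (outputs : List String),
  Dom_normalize_outputs outputs → Pre_normalize_outputs outputs →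
  Spec_normalize_outputs outputs (normalize_outputs outputs)

-- ===== LEMMAS AND PROOFS =====

-- the normalized, empty-filtered parts of one item (B's comprehension, per item)
def pvParts (item : String) : List String :=
  (((PySem.Str.split? item ",").getD []).map (fun q => PySem.Str.lower (PySem.Str.strip q))).filter
    (fun p => p ≠ "")

lemma pvAStepPart_empty (st : List String × PySem.Set String) (q : String)
    (h : PySem.Str.lower (PySem.Str.strip q) = "") : pvAStepPart st q = st := by
  simp [pvAStepPart, h]

lemma pvAStepPart_valid (n : List String) (q : String)
    (h : PySem.Str.lower (PySem.Str.strip q) ∈ pvOutputChoices) :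
    pvAStepPart (n, n) q = (PySem.Set.add n (PySem.Str.lower (PySem.Str.strip q)),
                            PySem.Set.add n (PySem.Str.lower (PySem.Str.strip q))) := by
  have h0 : ¬ PySem.Str.lower (PySem.Str.strip q) = "" := by
    rintro he; rw [he] at h; revert h; decide
  by_cases hm : PySem.Str.lower (PySem.Str.strip q) ∈ n <;>
    simp [pvAStepPart, h0, h, PySem.Set.contains, PySem.Set.add, hm]

-- A's inner loop over one item's raw parts extends a state (n, n) to the dedup-update by pvParts
lemma inner_fold_eq (item : String) (n : List String)
    (hv : ∀ q ∈ (PySem.Str.split? item ",").getD [],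
      PySem.Str.lower (PySem.Str.strip q) = "" ∨ PySem.Str.lower (PySem.Str.strip q) ∈ pvOutputChoices) :
    pvAStepItem (n, n) item
      = (PySem.Set.update n (pvParts item), PySem.Set.update n (pvParts item)) := by
  unfold pvAStepItem pvParts
  generalize (PySem.Str.split? item ",").getD [] = qs at hv ⊢
  induction qs generalizing n with
  | nil => simp [PySem.Set.update]
  | cons q rest ih =>
    have hrest : ∀ x ∈ rest, PySem.Str.lower (PySem.Str.strip x) = "" ∨
        PySem.Str.lower (PySem.Str.strip x) ∈ pvOutputChoices :=
      fun x hx => hv x (List.mem_cons_of_mem _ hx)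
    rcases hv q (List.mem_cons_self ..) with h0 | hq
    · rw [List.foldl_cons, pvAStepPart_empty _ _ h0, ih _ hrest]
      simp [h0]
    · rw [List.foldl_cons, pvAStepPart_valid _ _ hq, ih _ hrest]
      have h0 : ¬ PySem.Str.lower (PySem.Str.strip q) = "" := by
        rintro he; rw [he] at hq; revert hq; decide
      simp [h0, PySem.Set.update]

-- A's outer loop from (n, n) computes the dedup-update by the flattened parts
lemma outer_fold_eq (outputs : List String) (n : List String)
    (hv : ∀ item ∈ outputs, ∀ q ∈ (PySem.Str.split? item ",").getD [],
      PySem.Str.lower (PySem.Str.strip q) = "" ∨ PySem.Str.lower (PySem.Str.strip q) ∈ pvOutputChoices) :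
    outputs.foldl pvAStepItem (n, n)
    = (PySem.Set.update n (outputs.flatMap pvParts), PySem.Set.update n (outputs.flatMap pvParts)) := by
  induction outputs generalizing n with
  | nil => simp [PySem.Set.update]
  | cons item rest ih =>
    rw [List.foldl_cons, inner_fold_eq item n (hv item (List.mem_cons_self ..)),
        ih _ (fun x hx => hv x (List.mem_cons_of_mem _ hx))]
    simp [PySem.Set.update, List.foldl_append]

-- first-occurrence order: the distinct elements of xs, in ofList order, have strictly
-- increasing first indices in xs
lemma ofList_pairwise_index (xs : List String) :
    (PySem.Set.ofList xs).Pairwise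
      (fun a b => (PySem.List.index? xs a).getD 0 < (PySem.List.index? xs b).getD 0) := by
  induction xs with
  | nil => simp [PySem.Set.ofList]
  | cons x xs ih =>
    rw [PySem.Set.ofList_cons]
    constructor
    · intro y hy
      have hyne : y ≠ x := by
        have := List.of_mem_filter hy; simpa using this
      have hymem : y ∈ xs := (PySem.Set.mem_ofList xs y).1 (List.mem_of_mem_filter hy)
      obtain ⟨i, hi⟩ := Option.isSome_iff_exists.1 ((PySem.List.index?_isSome_iff xs y).2 hymem)
      rw [PySem.List.index?_cons_self, PySem.List.index?_cons_of_ne xs (Ne.symm hyne), hi]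
      simp
    · have hsub : ((PySem.Set.ofList xs).discard x).Sublist (PySem.Set.ofList xs) :=
        List.filter_sublist
      refine (ih.sublist hsub).imp_of_mem ?_
      intro a b ha hb hab
      have hane : a ≠ x := by have := List.of_mem_filter ha; simpa using this
      have hbne : b ≠ x := by have := List.of_mem_filter hb; simpa using this
      have hamem : a ∈ xs := (PySem.Set.mem_ofList xs a).1 (List.mem_of_mem_filter ha)
      have hbmem : b ∈ xs := (PySem.Set.mem_ofList xs b).1 (List.mem_of_mem_filter hb)
      obtain ⟨i, hi⟩ := Option.isSome_iff_exists.1 ((PySem.List.index?_isSome_iff xs a).2 hamem)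
      obtain ⟨j, hj⟩ := Option.isSome_iff_exists.1 ((PySem.List.index?_isSome_iff xs b).2 hbmem)
      rw [PySem.List.index?_cons_of_ne xs (Ne.symm hane),
          PySem.List.index?_cons_of_ne xs (Ne.symm hbne), hi, hj]
      rw [hi, hj] at hab
      simpa using hab

-- B's sort of the present choices by first index reproduces first-occurrence dedup order
lemma sorted_chosen_eq_ofList (tokens : List String)
    (hv : ∀ t ∈ tokens, t ∈ pvOutputChoices) :
    PySem.List.sorted (pvOutputChoices.filter (fun c => decide (c ∈ tokens)))
        (fun c => (PySem.List.index? tokens c).getD 0)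
      = PySem.Set.ofList tokens := by
  apply PySem.List.sorted_eq_of_perm_of_pairwise_lt
  · refine (List.perm_ext_iff_of_nodup (PySem.Set.nodup_ofList tokens)
      (List.Nodup.filter _ (by decide))).2 ?_
    intro a
    rw [PySem.Set.mem_ofList, List.mem_filter]
    constructor
    · intro ha; exact ⟨hv a ha, by simpa using ha⟩
    · rintro ⟨-, ha⟩; simpa using ha
  · exact ofList_pairwise_index tokens

-- ===== VERDICT (by name: the statement is the Claim_ definition above) =====
theorem normalize_outputs_spec : Claim_equal_normalize_outputs := by
  intro outputs _hdom hpre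
  unfold Spec_normalize_outputs normalize_outputs normalize_outputs_alt
  by_cases hnil : outputs = []
  · simp [hnil]
  · simp only [if_neg hnil]
    have h := outer_fold_eq outputs [] hpre
    simp only [PySem.Set.empty] at h ⊢
    rw [h, PySem.Set.update_nil_left]
    have hv : ∀ t ∈ outputs.flatMap pvParts, t ∈ pvOutputChoices := by
      intro t ht
      obtain ⟨item, hitem, hpart⟩ := List.mem_flatMap.1 ht
      unfold pvParts at hpart
      obtain ⟨hmap, hne⟩ := List.mem_filter.1 hpart
      obtain ⟨q, hq, rfl⟩ := List.mem_map.1 hmap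
      rcases hpre item hitem q hq with h0 | hok
      · exact absurd (by simpa using h0) (by simpa using hne)
      · exact hok
    rw [show (fun item => (((PySem.Str.split? item ",").getD []).map
          (fun q => PySem.Str.lower (PySem.Str.strip q))).filter (fun p => p ≠ "")) = pvParts
        from rfl]
    rw [sorted_chosen_eq_ofList _ hv]
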